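-- pv_equiv track=rewrite | github.com/johannesnicolaus/TOGA2 | src/python/modules/cesar_wrapper_executables.py | parse_extr_exon_fasta
-- ===== SOURCE A (Python) =====
-- from collections import defaultdict
-- from typing import Any, Dict, Iterable, List, Set, TextIO, Tuple, Union
--
-- def parse_extr_exon_fasta(raw_fasta: str) -> Dict[str, Dict[int, str]]:
--     """
--     An ad hoc FASTA parser for CESAR preprocessing step. Given a raw FASTA string
--     containing exon sequences for one or more transcripts, returns a
--     {transcript: {exon_number: exon_sequence}} nested dictionary. Exon naming
--     convention is {transcript_name}|{exon_number}.
--     """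
--     output_dict: Dict[str, Dict[int, str]] = defaultdict(dict)
--     has_entry: bool = False
--     curr_seq: str = ""
--     transcript: str = ""
--     exon: str = ""
--     for line in raw_fasta.split("\n"):
--         if not line:
--             continue
--         if line[0] == ">":
--             if has_entry:
--                 output_dict[transcript][exon] = curr_seq
--                 curr_seq = ""
--             has_entry = True
--             transcript, exon = line.split("|")
--             transcript = transcript.lstrip(">")
--             exon = int(exon)
--         else:
--             curr_seq += line
--     if has_entry:
--         output_dict[transcript][exon] = curr_seq
--     return output_dict
-- ===== SOURCE B (Python) =====
-- from collections import defaultdict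
--
--
-- def parse_extr_exon_fasta(raw_fasta):
--     """Block-oriented FASTA parser: skip to the first header, then repeatedly
--     take one header line plus the sequence lines of its block."""
--     lines = [l for l in raw_fasta.split("\n") if l]
--     output = defaultdict(dict)
--     i = 0
--     while i < len(lines) and lines[i][0] != ">":
--         i += 1  # sequence lines before the first header belong to no record
--     while i < len(lines):
--         j = i + 1
--         seq = ""
--         while j < len(lines) and lines[j][0] != ">":
--             seq += lines[j]
--             j += 1
--         transcript, exon = lines[i].split("|")
--         output[transcript.lstrip(">")][int(exon)] = seq
--         i = j
--     return output
-- ===== Notes on version B (the rewrite author's own statement) =====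
-- stated objective: alternative
-- what changed: Replaces A's accumulate-with-has_entry/curr_seq flush state machine by a block-oriented scan: filter nonempty lines once, skip to the first header, then repeatedly take one header line plus the sequence lines of its block and store the record.
-- intended difference: On inputs whose first nonempty line is not a header while a later line is (and the first header's transcript/exon key is not overwritten by a later duplicate header), A prepends those leading sequence lines to the first record's sequence (leftover curr_seq state), while B attaches them to no record, which is intended since lines before any header name no exon. — e.g. on parse_extr_exon_fasta("x\n>t|1\nAC"): A returns [("t", [(1, "xAC")])], B returns [("t", [(1, "AC")])]
import Mathlib
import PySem

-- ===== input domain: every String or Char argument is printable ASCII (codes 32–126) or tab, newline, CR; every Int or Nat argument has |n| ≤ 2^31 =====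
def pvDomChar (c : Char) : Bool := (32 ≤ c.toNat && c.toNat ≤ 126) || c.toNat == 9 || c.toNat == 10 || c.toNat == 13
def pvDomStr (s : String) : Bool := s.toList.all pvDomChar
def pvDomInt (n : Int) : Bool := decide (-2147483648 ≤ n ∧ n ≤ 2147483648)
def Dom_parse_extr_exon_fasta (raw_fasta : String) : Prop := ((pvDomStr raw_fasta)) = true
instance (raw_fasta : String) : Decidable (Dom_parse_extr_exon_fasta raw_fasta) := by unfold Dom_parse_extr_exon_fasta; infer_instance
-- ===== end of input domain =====

-- B replaces A's accumulate-and-flush state machine by a block-oriented scan (skip to first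
-- header, then repeatedly take one header plus its sequence lines); on inputs whose first
-- nonempty line is not a header but that do contain a header, A prepends the leading
-- sequence lines to the first record (leftover loop state) while B attaches them to no
-- record — see D_ below.

-- ===== PORT A =====
def pvD : Type := PySem.Dict (List Char) (PySem.Dict Int (List Char))

-- transcript, exon = line.split("|"); transcript.lstrip(">"); int(exon)  (none = ValueError)
def pvHeaderA (line : List Char) : Option (List Char × Int) :=
  match PySem.Chars.splitOn line ['|'] with
  | [t, e] =>
    match PySem.Int.ofChars? e with
    | some n => some (t.dropWhile (· == '>'), n)   -- lstrip(">") = drop leading '>' (exact)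
    | none => none
  | _ => none

-- the for-loop over raw_fasta.split("\n"), state (output_dict, has_entry, curr_seq, transcript, exon)
def pvLoopA : List (List Char) → pvD × Bool × List Char × List Char × Int →
    Option (pvD × Bool × List Char × List Char × Int)
  | [], st => some st
  | line :: rest, (d, hasEntry, currSeq, transcript, exon) =>
    if line.isEmpty then pvLoopA rest (d, hasEntry, currSeq, transcript, exon)
    else if line.head? == some '>' then
      let d' := if hasEntry then d.insert transcript ((d.getD transcript PySem.Dict.empty).insert exon currSeq) else d
      let currSeq' := if hasEntry then [] else currSeq
      match pvHeaderA line with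
      | some (t, e) => pvLoopA rest (d', true, currSeq', t, e)
      | none => none
    else pvLoopA rest (d, hasEntry, currSeq ++ line, transcript, exon)

def parse_extr_exon_fasta (raw_fasta : String) : List (String × List (Int × String)) :=
  match pvLoopA (PySem.Chars.splitOn raw_fasta.toList ['\n']) (PySem.Dict.empty, false, [], [], 0) with
  | none => []       -- ValueError; such inputs are outside Pre_
  | some (d, hasEntry, currSeq, transcript, exon) =>
    let dF := if hasEntry then d.insert transcript ((d.getD transcript PySem.Dict.empty).insert exon currSeq) else d
    dF.items.map (fun p => (String.ofList p.1, p.2.items.map (fun q => (q.1, String.ofList q.2))))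

-- ===== PORT B =====
def pvHeaderB (line : List Char) : Option (List Char × Int) :=
  match PySem.Chars.splitOn line ['|'] with
  | [t, e] =>
    match PySem.Int.ofChars? e with
    | some n => some (t.dropWhile (· == '>'), n)
    | none => none
  | _ => none

-- first while loop: skip to the first header line
def pvSkipB : List (List Char) → List (List Char)
  | [] => []
  | l :: rest => if !(l.head? == some '>') then pvSkipB rest else l :: rest

-- inner while loop: (concatenated sequence lines of the block, remainder from the next header)
def pvTakeSeq : List (List Char) → List Char × List (List Char)
  | [] => ([], [])
  | l :: rest =>
    if !(l.head? == some '>') then (l ++ (pvTakeSeq rest).1, (pvTakeSeq rest).2)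
    else ([], l :: rest)

theorem pvTakeSeq_len : ∀ (lines : List (List Char)), (pvTakeSeq lines).2.length ≤ lines.length := by
  intro lines
  induction lines with
  | nil => simp [pvTakeSeq]
  | cons l rest ih =>
    by_cases h : (!(l.head? == some '>')) = true
    · simp [pvTakeSeq, h]; omega
    · simp [pvTakeSeq, h] at *

-- outer while loop
def pvLoopB : List (List Char) → pvD → Option pvD
  | [], d => some d
  | l :: rest, d =>
    match pvHeaderB l with
    | none => none
    | some (t, e) =>
      pvLoopB (pvTakeSeq rest).2
        (d.insert t ((d.getD t PySem.Dict.empty).insert e (pvTakeSeq rest).1))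
  termination_by lines _ => lines.length
  decreasing_by exact Nat.lt_succ_of_le (pvTakeSeq_len rest)

def parse_extr_exon_fasta_alt (raw_fasta : String) : List (String × List (Int × String)) :=
  match pvLoopB (pvSkipB ((PySem.Chars.splitOn raw_fasta.toList ['\n']).filter (fun l => !l.isEmpty))) PySem.Dict.empty with
  | none => []       -- ValueError; such inputs are outside Pre_
  | some d => d.items.map (fun p => (String.ofList p.1, p.2.items.map (fun q => (q.1, String.ofList q.2))))

-- ----- helper definitions for D_ (pure input inspection, used by no port) -----
-- the header lines: the text between any newline followed by '>' and the next newline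
def pvHdrsD : List Char → List (List Char)
  | [] => []
  | c :: cs =>
    if c == '\n' && PySem.Chars.startswith cs ['>'] then
      cs.takeWhile (· != '\n') :: pvHdrsD cs
    else pvHdrsD cs

-- a header line's record key: transcript stripped of leading '>', exon read as an int
def pvKeyD (l : List Char) : List Char × Option Int :=
  ((l.takeWhile (· != '|')).dropWhile (· == '>'),
   PySem.Int.ofChars? ((l.dropWhile (· != '|')).tail))

-- ===== PRECONDITION & SPEC =====
-- Pre_: exactly the inputs where Python A returns (no ValueError): every nonempty line that
-- starts with '>' splits on '|' into exactly two parts whose second part parses as an int.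
def Pre_parse_extr_exon_fasta (raw_fasta : String) : Prop :=
  ((PySem.Chars.splitOn raw_fasta.toList ['\n']).all (fun l =>
    !(l.head? == some '>') ||
      (match PySem.Chars.splitOn l ['|'] with
       | [_, e] => (PySem.Int.ofChars? e).isSome
       | _ => false))) = true
instance (raw_fasta : String) : Decidable (Pre_parse_extr_exon_fasta raw_fasta) := by
  unfold Pre_parse_extr_exon_fasta; infer_instance

def pvWitness_parse_extr_exon_fasta : String := ">tr|1\nACGT\n\n>tr|2\nTT"

-- On inputs whose first nonempty line is not a header while a later line is (and the first
-- header's key is not overwritten by a duplicate later on), A returns the first record with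
-- those leading sequence lines prepended to its sequence (leftover curr_seq state), while B
-- attaches such orphan lines to no record — the intended reading, since lines before any
-- header name no exon.
def D_parse_extr_exon_fasta (raw_fasta : String) : Prop :=
  ((match raw_fasta.toList.dropWhile (· == '\n') with
    | [] => false
    | d :: _ => d != '>') &&
   (match pvHdrsD raw_fasta.toList with
    | [] => false
    | h :: hs => hs.all (pvKeyD · != pvKeyD h))) = true
instance (raw_fasta : String) : Decidable (D_parse_extr_exon_fasta raw_fasta) := by
  unfold D_parse_extr_exon_fasta; infer_instance

def Spec_parse_extr_exon_fasta (raw_fasta : String) (out : List (String × List (Int × String))) : Prop :=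
  ¬ D_parse_extr_exon_fasta raw_fasta → out = parse_extr_exon_fasta_alt raw_fasta
instance (raw_fasta : String) (out : List (String × List (Int × String))) : Decidable (Spec_parse_extr_exon_fasta raw_fasta out) := by
  unfold Spec_parse_extr_exon_fasta; infer_instance

def pvDiffWitness_parse_extr_exon_fasta : String := "x\n>t|1\nAC"
def pvDiffWitnessOut_parse_extr_exon_fasta :
    (List (String × List (Int × String))) × (List (String × List (Int × String))) :=
  ([("t", [(1, "xAC")])], [("t", [(1, "AC")])])

-- ===== CLAIM (what is proved, stated in full; the proofs are below) =====
def Claim_unchanged_parse_extr_exon_fasta : Prop := ∀ (raw_fasta : String), Dom_parse_extr_exon_fasta raw_fasta → Pre_parse_extr_exon_fasta raw_fasta → Spec_parse_extr_exon_fasta raw_fasta (parse_extr_exon_fasta raw_fasta)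
def Claim_changed_parse_extr_exon_fasta : Prop := Dom_parse_extr_exon_fasta (pvDiffWitness_parse_extr_exon_fasta) ∧ Pre_parse_extr_exon_fasta (pvDiffWitness_parse_extr_exon_fasta) ∧ D_parse_extr_exon_fasta (pvDiffWitness_parse_extr_exon_fasta) ∧ parse_extr_exon_fasta (pvDiffWitness_parse_extr_exon_fasta) = pvDiffWitnessOut_parse_extr_exon_fasta.1 ∧ parse_extr_exon_fasta_alt (pvDiffWitness_parse_extr_exon_fasta) = pvDiffWitnessOut_parse_extr_exon_fasta.2 ∧ pvDiffWitnessOut_parse_extr_exon_fasta.1 ≠ pvDiffWitnessOut_parse_extr_exon_fasta.2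
def Claim_exact_parse_extr_exon_fasta : Prop := ∀ (raw_fasta : String), Dom_parse_extr_exon_fasta raw_fasta → Pre_parse_extr_exon_fasta raw_fasta → D_parse_extr_exon_fasta raw_fasta → parse_extr_exon_fasta raw_fasta ≠ parse_extr_exon_fasta_alt raw_fasta

-- ===== LEMMAS AND PROOFS =====

-- the final flush of A ("if has_entry: output_dict[transcript][exon] = curr_seq")
def pvIns (d : pvD) (b : (List Char × Int) × List Char) : pvD :=
  d.insert b.1.1 ((d.getD b.1.1 PySem.Dict.empty).insert b.1.2 b.2)

def pvFin : pvD × Bool × List Char × List Char × Int → pvD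
  | (d, h, c, t, e) => if h then pvIns d ((t, e), c) else d

-- specification skeleton: (sequence lines before the first header joined, [(header, joined block)])
def pvCollect : List (List Char) → List Char × List (List Char × List Char)
  | [] => ([], [])
  | l :: rest =>
    if l.head? == some '>' then ([], (l, (pvCollect rest).1) :: (pvCollect rest).2)
    else (l ++ (pvCollect rest).1, (pvCollect rest).2)

def pvParseBlock (b : List Char × List Char) : (List Char × Int) × List Char :=
  ((pvHeaderA b.1).getD ([], 0), b.2)

def pvAllParse (lines : List (List Char)) : Bool :=
  lines.all (fun l => !(l.head? == some '>') || (pvHeaderA l).isSome)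

-- fuel version of pvLoopB, structural, for rewriting and induction
def pvLoopBF : Nat → List (List Char) → pvD → Option pvD
  | _, [], d => some d
  | 0, _ :: _, _ => none
  | n + 1, l :: rest, d =>
    match pvHeaderB l with
    | none => none
    | some (t, e) =>
      pvLoopBF n (pvTakeSeq rest).2
        (d.insert t ((d.getD t PySem.Dict.empty).insert e (pvTakeSeq rest).1))

theorem pvLoopB_eq_fuel : ∀ (n : Nat) (lines : List (List Char)) (d : pvD),
    lines.length ≤ n → pvLoopB lines d = pvLoopBF n lines d := by
  intro n
  induction n with
  | zero =>
    intro lines d h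
    have : lines = [] := List.length_eq_zero_iff.mp (Nat.le_zero.mp h)
    subst this
    simp [pvLoopB, pvLoopBF]
  | succ n ih =>
    intro lines d h
    cases lines with
    | nil => simp [pvLoopB, pvLoopBF]
    | cons l rest =>
      rw [pvLoopB, pvLoopBF]
      cases hh : pvHeaderB l with
      | none => rfl
      | some te =>
        obtain ⟨t, e⟩ := te
        exact ih _ _ (le_trans (pvTakeSeq_len rest) (Nat.le_of_succ_le_succ h))

theorem pvTakeSeq_collect1 : ∀ (lines : List (List Char)),
    (pvTakeSeq lines).1 = (pvCollect lines).1 := by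
  intro lines
  induction lines with
  | nil => rfl
  | cons l rest ih =>
    by_cases hl : (l.head? == some '>') = true
    · simp [pvTakeSeq, pvCollect, hl]
    · simp [pvTakeSeq, pvCollect, hl, ih]

theorem pvTakeSeq_collect2 : ∀ (lines : List (List Char)),
    (pvCollect (pvTakeSeq lines).2).2 = (pvCollect lines).2 := by
  intro lines
  induction lines with
  | nil => rfl
  | cons l rest ih =>
    by_cases hl : (l.head? == some '>') = true
    · simp [pvTakeSeq, pvCollect, hl]
    · simp [pvTakeSeq, pvCollect, hl, ih]

theorem pvTakeSeq_suffix : ∀ (lines : List (List Char)), (pvTakeSeq lines).2 <:+ lines := by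
  intro lines
  induction lines with
  | nil => simp [pvTakeSeq]
  | cons l rest ih =>
    by_cases hl : (l.head? == some '>') = true
    · simp [pvTakeSeq, hl]
    · simp only [pvTakeSeq, hl]
      exact ih.trans (List.suffix_cons l rest)

theorem pvTakeSeq_head : ∀ (lines : List (List Char)),
    (pvTakeSeq lines).2 = [] ∨
      ∃ l r, (pvTakeSeq lines).2 = l :: r ∧ (l.head? == some '>') = true := by
  intro lines
  induction lines with
  | nil => left; rfl
  | cons l rest ih =>
    by_cases hl : (l.head? == some '>') = true
    · right; exact ⟨l, rest, by simp [pvTakeSeq, hl], hl⟩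
    · simpa [pvTakeSeq, hl] using ih

theorem pvSkipB_eq : ∀ (lines : List (List Char)), pvSkipB lines = (pvTakeSeq lines).2 := by
  intro lines
  induction lines with
  | nil => rfl
  | cons l rest ih =>
    by_cases hl : (l.head? == some '>') = true
    · simp [pvSkipB, pvTakeSeq, hl]
    · simp [pvSkipB, pvTakeSeq, hl, ih]

theorem pvAllParse_of_sublist {l' l : List (List Char)} (h : List.Sublist l' l)
    (hall : pvAllParse l = true) : pvAllParse l' = true := by
  unfold pvAllParse at *
  rw [List.all_eq_true] at *
  exact fun x hx => hall x (h.subset hx)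

theorem pvHeaderB_eq : pvHeaderB = pvHeaderA := rfl

-- A's loop skips empty lines, so it only sees the nonempty ones
theorem pvLoopA_filter : ∀ (lines : List (List Char)) (st : pvD × Bool × List Char × List Char × Int),
    pvLoopA lines st = pvLoopA (lines.filter (fun l => !l.isEmpty)) st := by
  intro lines
  induction lines with
  | nil => intro st; rfl
  | cons l rest ih =>
    intro st
    obtain ⟨d, h, c, t, e⟩ := st
    by_cases hl : l.isEmpty = true
    · have : l = [] := List.isEmpty_iff.mp hl
      subst this
      simp [pvLoopA, ih]
    · have hfil : (l :: rest).filter (fun l => !l.isEmpty) =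
          l :: rest.filter (fun l => !l.isEmpty) := by
        simp [hl]
      rw [hfil]
      by_cases hh : (l.head? == some '>') = true
      · simp only [pvLoopA, hl, hh, if_false, if_true, Bool.false_eq_true]
        cases pvHeaderA l with
        | none => rfl
        | some te => obtain ⟨t', e'⟩ := te; exact ih _
      · simp only [pvLoopA, hl, hh, if_false, Bool.false_eq_true]
        exact ih _

theorem pvLoopA_true : ∀ (lines : List (List Char)) (d : pvD) (c t : List Char) (e : Int),
    pvAllParse lines = true →
    (pvLoopA lines (d, true, c, t, e)).map pvFin =
      some ((((t, e), c ++ (pvCollect lines).1) ::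
        (pvCollect lines).2.map pvParseBlock).foldl pvIns d) := by
  intro lines
  induction lines with
  | nil =>
    intro d c t e _
    simp [pvLoopA, pvFin, pvCollect]
  | cons l rest ih =>
    intro d c t e hall
    have hall' : pvAllParse rest = true := by
      unfold pvAllParse at *
      rw [List.all_eq_true] at *
      exact fun x hx => hall x (by simp [hx])
    by_cases hl : l.isEmpty = true
    · have hle : l = [] := List.isEmpty_iff.mp hl
      subst hle
      have e1 : ∀ st : pvD × Bool × List Char × List Char × Int,
          pvLoopA ([] :: rest) st = pvLoopA rest st := by
        intro st; obtain ⟨d', h', c', t', e'⟩ := st; simp [pvLoopA]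
      rw [e1, ih _ _ _ _ hall']
      simp [pvCollect]
    · by_cases hh : (l.head? == some '>') = true
      · have hp : (pvHeaderA l).isSome = true := by
          unfold pvAllParse at hall
          rw [List.all_eq_true] at hall
          have := hall l (by simp)
          simpa [hh] using this
        obtain ⟨⟨t', e'⟩, hte⟩ := Option.isSome_iff_exists.mp hp
        simp only [pvLoopA, hl, hh, if_true, if_false, Bool.false_eq_true, hte]
        rw [ih _ _ _ _ hall']
        simp only [pvCollect, hh, if_true]
        simp [pvParseBlock, hte, pvIns]
      · simp only [pvLoopA, hl, hh, if_false, Bool.false_eq_true]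
        rw [ih _ _ _ _ hall']
        simp [pvCollect, hh, List.append_assoc]

-- A from its initial state: leading sequence lines are prepended to the FIRST record
theorem pvLoopA_false : ∀ (lines : List (List Char)) (d : pvD) (c t : List Char) (e : Int),
    pvAllParse lines = true →
    (pvLoopA lines (d, false, c, t, e)).map pvFin =
      some (match (pvCollect lines).2 with
            | [] => d
            | b :: bs => (((pvHeaderA b.1).getD ([], 0), c ++ (pvCollect lines).1 ++ b.2) ::
                bs.map pvParseBlock).foldl pvIns d) := by
  intro lines
  induction lines with
  | nil =>
    intro d c t e _
    simp [pvLoopA, pvFin, pvCollect]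
  | cons l rest ih =>
    intro d c t e hall
    have hall' : pvAllParse rest = true := by
      unfold pvAllParse at *
      rw [List.all_eq_true] at *
      exact fun x hx => hall x (by simp [hx])
    by_cases hl : l.isEmpty = true
    · have hle : l = [] := List.isEmpty_iff.mp hl
      subst hle
      have e1 : ∀ st : pvD × Bool × List Char × List Char × Int,
          pvLoopA ([] :: rest) st = pvLoopA rest st := by
        intro st; obtain ⟨d', h', c', t', e'⟩ := st; simp [pvLoopA]
      rw [e1, ih _ _ _ _ hall']
      simp [pvCollect]
    · by_cases hh : (l.head? == some '>') = true
      · have hp : (pvHeaderA l).isSome = true := by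
          unfold pvAllParse at hall
          rw [List.all_eq_true] at hall
          have := hall l (by simp)
          simpa [hh] using this
        obtain ⟨⟨t', e'⟩, hte⟩ := Option.isSome_iff_exists.mp hp
        simp only [pvLoopA, hl, hh, if_true, if_false, Bool.false_eq_true, hte]
        rw [pvLoopA_true _ _ _ _ _ hall']
        simp [pvCollect, hh, hte]
      · simp only [pvLoopA, hl, hh, if_false, Bool.false_eq_true]
        rw [ih _ _ _ _ hall']
        simp [pvCollect, hh, List.append_assoc]

-- B's outer loop, started at a header (or on nothing), builds exactly the parsed blocks
theorem pvLoopBF_blocks : ∀ (n : Nat) (lines : List (List Char)) (d : pvD),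
    lines.length ≤ n → pvAllParse lines = true →
    (lines = [] ∨ ∃ l r, lines = l :: r ∧ (l.head? == some '>') = true) →
    pvLoopBF n lines d = some (((pvCollect lines).2.map pvParseBlock).foldl pvIns d) := by
  intro n
  induction n with
  | zero =>
    intro lines d hlen _ _
    have : lines = [] := List.length_eq_zero_iff.mp (Nat.le_zero.mp hlen)
    subst this
    simp [pvLoopBF, pvCollect]
  | succ n ih =>
    intro lines d hlen hall hhead
    rcases hhead with rfl | ⟨l, r, rfl, hh⟩
    · simp [pvLoopBF, pvCollect]
    · have hp : (pvHeaderA l).isSome = true := by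
        unfold pvAllParse at hall
        rw [List.all_eq_true] at hall
        have := hall l (by simp)
        simpa [hh] using this
      obtain ⟨⟨t, e⟩, hte⟩ := Option.isSome_iff_exists.mp hp
      have hteB : pvHeaderB l = some (t, e) := by rw [pvHeaderB_eq]; exact hte
      simp only [pvLoopBF, hteB]
      rw [ih _ _ (le_trans (pvTakeSeq_len r) (Nat.le_of_succ_le_succ hlen))
        (pvAllParse_of_sublist (pvTakeSeq_suffix r).sublist
          (pvAllParse_of_sublist (List.sublist_cons_self l r) hall))
        (pvTakeSeq_head r)]
      rw [pvTakeSeq_collect2]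
      simp [pvCollect, hh, pvParseBlock, hte, pvIns, pvTakeSeq_collect1]

-- Pre_'s per-line condition is exactly "pvHeaderA succeeds"
theorem pvPre_header (l : List Char) :
    (match PySem.Chars.splitOn l ['|'] with
     | [_, e] => (PySem.Int.ofChars? e).isSome
     | _ => false) = (pvHeaderA l).isSome := by
  unfold pvHeaderA
  cases hs : PySem.Chars.splitOn l ['|'] with
  | nil => rfl
  | cons a tl =>
    cases tl with
    | nil => rfl
    | cons b tl2 =>
      cases tl2 with
      | nil =>
        cases hn : PySem.Int.ofChars? b <;> simp [hn]
      | cons c tl3 => rfl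

theorem pvPre_allParse {raw : String} (h : Pre_parse_extr_exon_fasta raw) :
    pvAllParse (PySem.Chars.splitOn raw.toList ['\n']) = true := by
  unfold Pre_parse_extr_exon_fasta at h
  unfold pvAllParse
  rw [List.all_eq_true] at *
  intro l hl
  have := h l hl
  rw [pvPre_header] at this
  exact this


-- ----- a simple recursive splitter equal to PySem.Chars.splitOn for a one-char separator -----
def mySplitC (sep : Char) : List Char → List (List Char)
  | [] => [[]]
  | c :: cs => if c == sep then [] :: mySplitC sep cs else (mySplitC sep cs).modifyHead (c :: ·)

theorem mySplitC_cons (sep : Char) : ∀ (cs : List Char),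
    ∃ t, mySplitC sep cs = cs.takeWhile (fun c => !(c == sep)) :: t := by
  intro cs
  induction cs with
  | nil => exact ⟨[], rfl⟩
  | cons c cs ih =>
    obtain ⟨t, ht⟩ := ih
    by_cases hc : (c == sep) = true
    · exact ⟨mySplitC sep cs, by simp [mySplitC, hc]⟩
    · exact ⟨t, by simp [mySplitC, hc, ht]⟩

theorem mySplitC_go_spec (sep : Char) : ∀ (fuel : Nat) (l cur : List Char) (acc : List (List Char)),
    l.length ≤ fuel →
    PySem.Chars.splitOn.go [sep] fuel l cur acc =
      acc.reverse ++ (mySplitC sep l).modifyHead (fun h => cur.reverse ++ h) := by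
  intro fuel
  induction fuel with
  | zero =>
    intro l cur acc hlen
    have : l = [] := List.length_eq_zero_iff.mp (Nat.le_zero.mp hlen)
    subst this
    simp [PySem.Chars.splitOn.go, mySplitC]
  | succ n ih =>
    intro l cur acc hlen
    cases l with
    | nil => simp [PySem.Chars.splitOn.go, mySplitC]
    | cons c rest =>
      by_cases hc : (c == sep) = true
      · have hc' : c = sep := by simpa using hc
        subst hc'
        rw [show PySem.Chars.splitOn.go [c] (n + 1) (c :: rest) cur acc =
            PySem.Chars.splitOn.go [c] n rest [] (cur.reverse :: acc) from by
          simp [PySem.Chars.splitOn.go, List.isPrefixOf]]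
        rw [ih rest [] _ (by simpa using Nat.le_of_succ_le_succ hlen)]
        obtain ⟨t, ht⟩ := mySplitC_cons c rest
        simp [mySplitC, ht]
      · rw [show PySem.Chars.splitOn.go [sep] (n + 1) (c :: rest) cur acc =
            PySem.Chars.splitOn.go [sep] n rest (c :: cur) acc from by
          simp [PySem.Chars.splitOn.go, List.isPrefixOf]
          intro he
          subst he
          simp at hc]
        rw [ih rest (c :: cur) _ (by simpa using Nat.le_of_succ_le_succ hlen)]
        obtain ⟨t, ht⟩ := mySplitC_cons sep rest
        simp [mySplitC, hc, ht]

theorem splitOn_single (sep : Char) (cs : List Char) :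
    PySem.Chars.splitOn cs [sep] = mySplitC sep cs := by
  unfold PySem.Chars.splitOn
  rw [mySplitC_go_spec sep _ _ _ _ (by omega)]
  obtain ⟨t, ht⟩ := mySplitC_cons sep cs
  simp [ht]

theorem mySplitC_length (sep : Char) : ∀ (cs : List Char),
    (mySplitC sep cs).length = cs.count sep + 1 := by
  intro cs
  induction cs with
  | nil => simp [mySplitC]
  | cons c cs ih =>
    by_cases hc : (c == sep) = true
    · simp [mySplitC, hc, List.count_cons, ih]
    · simp [mySplitC, hc, List.count_cons, ih]

theorem mySplitC_zero (sep : Char) : ∀ (cs : List Char),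
    cs.count sep = 0 → mySplitC sep cs = [cs] := by
  intro cs
  induction cs with
  | nil => intro _; rfl
  | cons c cs ih =>
    intro h
    by_cases hc : (c == sep) = true
    · simp [List.count_cons, hc] at h
    · rw [List.count_cons] at h
      simp only [hc] at h
      simp [mySplitC, hc, ih (by omega)]

theorem mySplitC_one (sep : Char) : ∀ (cs : List Char),
    cs.count sep = 1 →
    mySplitC sep cs = [cs.takeWhile (fun c => !(c == sep)),
                       (cs.dropWhile (fun c => !(c == sep))).tail] := by
  intro cs
  induction cs with
  | nil => intro h; simp at h
  | cons c cs ih =>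
    intro h
    by_cases hc : (c == sep) = true
    · have h0 : cs.count sep = 0 := by
        rw [List.count_cons] at h
        simp only [if_pos hc] at h
        omega
      simp [mySplitC, hc, mySplitC_zero sep cs h0]
    · have h1 : cs.count sep = 1 := by
        rw [List.count_cons] at h
        simp only [if_neg hc] at h
        omega
      simp [mySplitC, hc, ih h1]

theorem pvCollect_headers : ∀ (lines : List (List Char)),
    (pvCollect lines).2.map Prod.fst = lines.filter (fun x => x.head? == some '>') := by
  intro lines
  induction lines with
  | nil => rfl
  | cons l rest ih =>
    by_cases hh : (l.head? == some '>') = true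
    · simp [pvCollect, hh, ih]
    · simp [pvCollect, hh, ih]

theorem startswith_head (l : List Char) :
    (PySem.Chars.startswith l ['>']) = (l.head? == some '>') := by
  cases l with
  | nil => rfl
  | cons a t =>
    simp only [PySem.Chars.startswith, List.isPrefixOf, Bool.and_true, List.head?_cons]
    simp [eq_comm]

-- head of the nonempty lines, read off the raw characters
theorem pvFirst : ∀ (cs : List Char),
    ((mySplitC '\n' cs).filter (fun l => !l.isEmpty)).head? =
      (match cs.dropWhile (fun c => c == '\n') with
       | [] => none
       | d :: u => some (d :: u.takeWhile (fun c => !(c == '\n')))) := by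
  intro cs
  induction cs with
  | nil => rfl
  | cons c cs ih =>
    by_cases hc : (c == '\n') = true
    · have hc' : c = '\n' := by simpa using hc
      subst hc'
      simp only [mySplitC, List.filter_cons, List.isEmpty_nil, Bool.not_true,
        List.dropWhile_cons, if_pos (by simp : (('\n' == '\n') : Bool) = true)]
      simpa using ih
    · obtain ⟨t, ht⟩ := mySplitC_cons '\n' cs
      rw [show mySplitC '\n' (c :: cs) = (mySplitC '\n' cs).modifyHead (c :: ·) from by
        simp [mySplitC, hc], ht, List.modifyHead_cons, List.filter_cons]
      simp only [List.isEmpty_cons, Bool.not_false, if_true, List.head?_cons,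
        List.dropWhile_cons]
      rw [if_neg hc]

theorem pvHdrsD_cons (c : Char) (cs : List Char) :
    pvHdrsD (c :: cs) =
      if (c == '\n' && PySem.Chars.startswith cs ['>']) = true then
        cs.takeWhile (fun d => !(d == '\n')) :: pvHdrsD cs
      else pvHdrsD cs := rfl

theorem pvKeyD_def (l : List Char) :
    pvKeyD l = ((l.takeWhile (fun c => !(c == '|'))).dropWhile (fun c => c == '>'),
      PySem.Int.ofChars? ((l.dropWhile (fun c => !(c == '|'))).tail)) := rfl

-- pvHdrsD reads exactly the header lines strictly after the first line
theorem pvHdrsD_eq : ∀ (cs : List Char),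
    pvHdrsD cs = (mySplitC '\n' cs).tail.filter (fun h => h.head? == some '>') := by
  intro cs
  induction cs with
  | nil => rfl
  | cons c cs ih =>
    by_cases hc : (c == '\n') = true
    · have hc' : c = '\n' := by simpa using hc
      subst hc'
      obtain ⟨t, ht⟩ := mySplitC_cons '\n' cs
      rw [show mySplitC '\n' ('\n' :: cs) = [] :: mySplitC '\n' cs from by simp [mySplitC],
        List.tail_cons, ht, List.filter_cons]
      have hline : ((cs.takeWhile (fun c => !(c == '\n'))).head? == some '>') =
          PySem.Chars.startswith cs ['>'] := by
        rw [startswith_head]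
        cases cs with
        | nil => rfl
        | cons d cs' =>
          by_cases hd : (d == '\n') = true
          · have hd' : d = '\n' := by simpa using hd
            subst hd'
            simp
          · simp [hd]
      rw [ht, List.tail_cons] at ih
      by_cases hsw : PySem.Chars.startswith cs ['>'] = true
      · rw [pvHdrsD_cons, if_pos (by simp [hsw]), if_pos (by rw [hline]; exact hsw), ih]
      · rw [pvHdrsD_cons, if_neg (by simp [hsw]), if_neg (by rw [hline]; simpa using hsw), ih]
    · rw [show pvHdrsD (c :: cs) = pvHdrsD cs from by rw [pvHdrsD_cons, if_neg (by simp [hc])],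
        show mySplitC '\n' (c :: cs) = (mySplitC '\n' cs).modifyHead (c :: ·) from by
          simp [mySplitC, hc], ih]
      obtain ⟨t, ht⟩ := mySplitC_cons '\n' cs
      rw [ht, List.modifyHead_cons, List.tail_cons, List.tail_cons]

-- empty lines are not headers, so the nonempty-line filter is transparent to headers
theorem pvFilter_hdr : ∀ (xs : List (List Char)),
    ((xs.filter (fun l => !l.isEmpty)).filter (fun h => h.head? == some '>')) =
      xs.filter (fun h => h.head? == some '>') := by
  intro xs
  induction xs with
  | nil => rfl
  | cons x xs ih =>
    by_cases hx : x.isEmpty = true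
    · have hx' : x = [] := List.isEmpty_iff.mp hx
      subst hx'
      simp [ih]
    · rw [List.filter_cons, if_pos (by simpa using hx), List.filter_cons, List.filter_cons, ih]

-- when the first nonempty line is not a header, pvHdrsD is exactly the headers after it
theorem pvRest_hdr (cs : List Char) (l : List Char) (rest : List (List Char))
    (hF : (mySplitC '\n' cs).filter (fun x => !x.isEmpty) = l :: rest)
    (hl : (l.head? == some '>') = false) :
    rest.filter (fun h => h.head? == some '>') = pvHdrsD cs := by
  obtain ⟨tailL, hsc⟩ := mySplitC_cons '\n' cs
  rw [pvHdrsD_eq, hsc, List.tail_cons]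
  rw [hsc, List.filter_cons] at hF
  by_cases h0 : (cs.takeWhile (fun c => !(c == '\n'))).isEmpty = true
  · rw [if_neg (by simp [h0])] at hF
    rw [← pvFilter_hdr tailL, hF, List.filter_cons, if_neg (by simp [hl])]
  · rw [if_pos (by simpa using h0)] at hF
    obtain ⟨rfl, hrest⟩ : cs.takeWhile (fun c => !(c == '\n')) = l ∧
        tailL.filter (fun x => !x.isEmpty) = rest := by
      injection hF with h1 h2
      exact ⟨h1, h2⟩
    rw [← hrest, pvFilter_hdr]

-- on a line that A parses, pvKeyD computes the same key
theorem pvKeyD_of_header (l : List Char) (k : List Char × Int)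
    (h : pvHeaderA l = some k) : pvKeyD l = (k.1, some k.2) := by
  unfold pvHeaderA at h
  rw [splitOn_single] at h
  cases hs : mySplitC '|' l with
  | nil => rw [hs] at h; exact absurd h (by simp)
  | cons a t1 =>
    cases t1 with
    | nil => rw [hs] at h; exact absurd h (by simp)
    | cons b t2 =>
      cases t2 with
      | cons c2 t3 => rw [hs] at h; exact absurd h (by simp)
      | nil =>
        have hcount : l.count '|' = 1 := by
          have := mySplitC_length '|' l
          rw [hs] at this
          simpa using this.symm
        have hone := mySplitC_one '|' l hcount
        rw [hs] at hone
        injection hone with h1 h2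
        injection h2 with h2 _
        rw [hs] at h
        have h' : (match PySem.Int.ofChars? b with
            | some n => some (a.dropWhile (fun c => c == '>'), n)
            | none => none) = some k := h
        cases hof : PySem.Int.ofChars? b with
        | none => rw [hof] at h'; exact absurd h' (by simp)
        | some n =>
          rw [hof] at h'
          have hk := Option.some.inj h'
          rw [pvKeyD_def, ← h2, hof, ← h1, ← hk]

-- ----- ordered-dict facts used by the overwrite argument -----
theorem dict_rep_key {κ ν : Type} [BEq κ] [LawfulBEq κ] (k j : κ) (v : ν) (p : κ × ν) :
    ((if p.1 == k then (k, v) else p).1 == j) = (p.1 == j) := by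
  by_cases hpk : (p.1 == k) = true
  · have : p.1 = k := eq_of_beq hpk
    simp [this]
  · simp [hpk]

theorem dict_contains_map_rep {κ ν : Type} [BEq κ] [LawfulBEq κ]
    (xs : List (κ × ν)) (k j : κ) (v : ν) :
    (PySem.Dict.mk (xs.map (fun p => if p.1 == k then (k, v) else p))).contains j =
      (PySem.Dict.mk xs).contains j := by
  simp only [PySem.Dict.contains, List.any_map]
  induction xs with
  | nil => rfl
  | cons p xs ih => simp [List.any_cons, ih, dict_rep_key, Function.comp]

theorem dict_insert_of_contains {κ ν : Type} [BEq κ] (d : PySem.Dict κ ν) (k : κ) (v : ν)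
    (h : d.contains k = true) :
    d.insert k v = PySem.Dict.mk (d.items.map (fun p => if p.1 == k then (k, v) else p)) := by
  unfold PySem.Dict.insert
  rw [if_pos h]

theorem dict_insert_of_not_contains {κ ν : Type} [BEq κ] (d : PySem.Dict κ ν) (k : κ) (v : ν)
    (h : d.contains k = false) :
    d.insert k v = PySem.Dict.mk (d.items ++ [(k, v)]) := by
  unfold PySem.Dict.insert
  rw [if_neg (by simp [h])]

theorem dict_insert_comm {κ ν : Type} [BEq κ] [LawfulBEq κ] (d : PySem.Dict κ ν)
    (k k' : κ) (v v' : ν) (hk : d.contains k = true) (hne : k ≠ k') :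
    (d.insert k v).insert k' v' = (d.insert k' v').insert k v := by
  have hne' : (k' == k) = false := by simpa using Ne.symm hne
  have hne'' : (k == k') = false := by simpa using hne
  have e1 := dict_insert_of_contains d k v hk
  by_cases hk' : d.contains k' = true
  · -- both keys present: both sides replace in place
    have e2 := dict_insert_of_contains d k' v' hk'
    have c1 : (d.insert k v).contains k' = true := by
      rw [e1, dict_contains_map_rep]; exact hk'
    have c2 : (d.insert k' v').contains k = true := by
      rw [e2, dict_contains_map_rep]; exact hk
    rw [dict_insert_of_contains _ k' v' c1, dict_insert_of_contains _ k v c2, e1, e2]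
    apply PySem.Dict.ext
    simp only [List.map_map]
    apply List.map_congr_left
    intro p _
    by_cases h1 : (p.1 == k) = true
    · have hp : p.1 = k := eq_of_beq h1
      simp [Function.comp, hp, hne'']
    · by_cases h2 : (p.1 == k') = true
      · have hp : p.1 = k' := eq_of_beq h2
        simp [Function.comp, hp, hne']
      · simp [Function.comp, h1, h2]
  · -- k' fresh: it is appended on both sides
    have hk'f : d.contains k' = false := by simpa using hk'
    have e2 := dict_insert_of_not_contains d k' v' hk'f
    have c1 : (d.insert k v).contains k' = false := by
      rw [e1, dict_contains_map_rep]; exact hk'f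
    have c2 : (d.insert k' v').contains k = true := by
      rw [e2]
      simp only [PySem.Dict.contains, List.any_append]
      simp only [PySem.Dict.contains] at hk
      simp [hk]
    rw [dict_insert_of_not_contains _ k' v' c1, dict_insert_of_contains _ k v c2, e1, e2]
    apply PySem.Dict.ext
    simp [hne']

-- state that the record slot k = (transcript, exon) is already present in d
def pvSlot (k : List Char × Int) (d : pvD) : Prop :=
  d.contains k.1 = true ∧ ((d.getD k.1 PySem.Dict.empty).contains k.2 = true)

theorem pvIns_collapse (d : pvD) (k : List Char × Int) (x z : List Char) :
    pvIns (pvIns d (k, x)) (k, z) = pvIns d (k, z) := by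
  obtain ⟨t, e⟩ := k
  unfold pvIns
  simp only []
  rw [PySem.Dict.getD_insert, if_pos rfl]
  rw [PySem.Dict.insert_insert_self, PySem.Dict.insert_insert_self]

theorem pvSlot_pvIns_self (d : pvD) (k : List Char × Int) (x : List Char) :
    pvSlot k (pvIns d (k, x)) := by
  obtain ⟨t, e⟩ := k
  unfold pvSlot pvIns
  simp

theorem pvSlot_mono (d : pvD) (k : List Char × Int) (p : (List Char × Int) × List Char)
    (h : pvSlot k d) : pvSlot k (pvIns d p) := by
  obtain ⟨⟨t, e⟩, z⟩ := p
  obtain ⟨tk, ek⟩ := k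
  obtain ⟨h1, h2⟩ := h
  unfold pvSlot pvIns
  constructor
  · simp [PySem.Dict.contains_insert, h1]
  · rw [PySem.Dict.getD_insert]
    by_cases ht : tk = t
    · subst ht
      simp [PySem.Dict.contains_insert, h2]
    · simp [ht, h2]

theorem pvIns_swap (d : pvD) (k : List Char × Int) (p : (List Char × Int) × List Char)
    (hne : p.1 ≠ k) (hs : pvSlot k d) (y : List Char) :
    pvIns (pvIns d (k, y)) p = pvIns (pvIns d p) (k, y) := by
  obtain ⟨⟨tp, ep⟩, z⟩ := p
  obtain ⟨tk, ek⟩ := k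
  obtain ⟨h1, h2⟩ := hs
  dsimp only at h1 h2
  by_cases ht : tp = tk
  · subst ht
    have hee : ep ≠ ek := by
      intro hcon
      exact hne (by simp [hcon])
    unfold pvIns
    simp only []
    rw [PySem.Dict.getD_insert, if_pos rfl, PySem.Dict.getD_insert, if_pos rfl]
    rw [PySem.Dict.insert_insert_self, PySem.Dict.insert_insert_self]
    rw [dict_insert_comm _ ek ep y z h2 (Ne.symm hee)]
  · unfold pvIns
    simp only []
    rw [PySem.Dict.getD_insert, if_neg ht, PySem.Dict.getD_insert, if_neg (Ne.symm ht)]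
    exact dict_insert_comm _ tk tp _ _ h1 (Ne.symm ht)

theorem pvFold_overwrite : ∀ (bs : List ((List Char × Int) × List Char)) (d : pvD)
    (k : List Char × Int) (y : List Char), pvSlot k d → k ∈ bs.map Prod.fst →
    bs.foldl pvIns (pvIns d (k, y)) = bs.foldl pvIns d := by
  intro bs
  induction bs with
  | nil => intro d k y _ hm; simp at hm
  | cons p bs ih =>
    intro d k y hs hm
    by_cases hp : p.1 = k
    · obtain ⟨p1, z⟩ := p
      simp only at hp
      subst hp
      simp only [List.foldl_cons]
      rw [pvIns_collapse]
    · simp only [List.foldl_cons]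
      have hp' : p = (p.1, p.2) := rfl
      rw [hp', pvIns_swap d k (p.1, p.2) hp hs y]
      have hm' : k ∈ bs.map Prod.fst := by
        rcases List.mem_map.mp hm with ⟨q, hq, hqk⟩
        rcases List.mem_cons.mp hq with rfl | hq
        · exact absurd hqk hp
        · exact List.mem_map.mpr ⟨q, hq, hqk⟩
      exact ih (pvIns d (p.1, p.2)) k y (pvSlot_mono d k _ hs) hm' 

theorem pvFold_first_irrelevant (bs : List ((List Char × Int) × List Char)) (d : pvD)
    (k : List Char × Int) (x y : List Char) (hm : k ∈ bs.map Prod.fst) :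
    bs.foldl pvIns (pvIns d (k, x)) = bs.foldl pvIns (pvIns d (k, y)) := by
  have h1 := pvFold_overwrite bs (pvIns d (k, x)) k y (pvSlot_pvIns_self d k x) hm
  rw [pvIns_collapse] at h1
  exact h1.symm

theorem pvFold_get2 : ∀ (bs : List ((List Char × Int) × List Char)) (d : pvD)
    (t1 : List Char) (e1 : Int), (∀ p ∈ bs, p.1 ≠ (t1, e1)) →
    ((bs.foldl pvIns d).getD t1 PySem.Dict.empty).get? e1 =
      ((d.getD t1 PySem.Dict.empty).get? e1) := by
  intro bs
  induction bs with
  | nil => intro d t1 e1 _; rfl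
  | cons p bs ih =>
    intro d t1 e1 hfr
    obtain ⟨⟨tp, ep⟩, z⟩ := p
    simp only [List.foldl_cons]
    rw [ih _ _ _ (fun q hq => hfr q (by simp [hq]))]
    unfold pvIns
    simp only []
    rw [PySem.Dict.getD_insert]
    by_cases ht : t1 = tp
    · subst ht
      rw [if_pos rfl]
      have hee : e1 ≠ ep := by
        intro hcon
        exact hfr ((t1, ep), z) (by simp) (by simp [hcon])
      rw [PySem.Dict.get?_insert_of_ne _ _ hee]
    · rw [if_neg ht]

theorem pvIns_get2_self (d : pvD) (t1 : List Char) (e1 : Int) (v : List Char) :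
    ((pvIns d ((t1, e1), v)).getD t1 PySem.Dict.empty).get? e1 = some v := by
  unfold pvIns
  simp only []
  rw [PySem.Dict.getD_insert, if_pos rfl, PySem.Dict.get?_insert_self]

theorem pvOut_inj : Function.Injective
    (fun p : List Char × PySem.Dict Int (List Char) =>
      (String.ofList p.1, p.2.items.map (fun q => (q.1, String.ofList q.2)))) := by
  have hof : Function.Injective String.ofList := by
    intro a b h
    simpa using congrArg String.toList h
  have hg : Function.Injective (fun q : Int × List Char => (q.1, String.ofList q.2)) := by
    intro a b h
    simp only [Prod.mk.injEq] at h
    exact Prod.ext h.1 (hof h.2)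
  intro p q h
  simp only [Prod.mk.injEq] at h
  refine Prod.ext (hof h.1) (PySem.Dict.ext ?_)
  exact List.map_injective_iff.mpr hg h.2

-- outside D_: either no leading junk (the lead is []) or the first header's record is
-- later overwritten by a duplicate key, so A's dictionary is B's dictionary.
-- hrec delivers the duplicate whenever the first nonempty line is junk and headers exist.
theorem pv_dicts (F : List (List Char)) (hall : pvAllParse F = true)
    (hrec : ∀ l rest, F = l :: rest → (l.head? == some '>') = false →
      ∀ h hs, rest.filter (fun x => x.head? == some '>') = h :: hs →
      ∃ h' ∈ hs, pvKeyD h' = pvKeyD h) :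
    (pvLoopA F (PySem.Dict.empty, false, [], [], 0)).map pvFin =
      some (((pvCollect F).2.map pvParseBlock).foldl pvIns PySem.Dict.empty) := by
  rw [pvLoopA_false F PySem.Dict.empty [] [] 0 hall]
  cases hblocks : (pvCollect F).2 with
  | nil => simp
  | cons b bs =>
    by_cases hlead : (pvCollect F).1 = []
    · simp [hlead, pvParseBlock]
    · cases F with
      | nil => simp [pvCollect] at hblocks
      | cons l rest =>
        have hh : ¬(l.head? == some '>') = true := by
          intro hh
          exact hlead (by simp [pvCollect, hh])
        have hmap := pvCollect_headers (l :: rest)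
        rw [hblocks, List.filter_cons, if_neg hh] at hmap
        simp only [List.map_cons] at hmap
        obtain ⟨h', hh'mem, hkeyeq⟩ :=
          hrec l rest rfl (by simpa using hh) b.1 (bs.map Prod.fst) hmap.symm
        have hbF : b.1 ∈ (l :: rest).filter (fun x => x.head? == some '>') := by
          rw [List.filter_cons, if_neg hh, ← hmap]
          simp
        have hbm := List.mem_filter.mp hbF
        have hpb : (pvHeaderA b.1).isSome = true := by
          unfold pvAllParse at hall
          rw [List.all_eq_true] at hall
          have := hall b.1 hbm.1
          simpa [hbm.2] using this
        obtain ⟨k1, hk1⟩ := Option.isSome_iff_exists.mp hpb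
        obtain ⟨b', hb'mem, rfl⟩ := List.mem_map.mp hh'mem
        have hb'F : b'.1 ∈ (l :: rest).filter (fun x => x.head? == some '>') := by
          rw [List.filter_cons, if_neg hh, ← hmap]
          simp only [List.mem_cons]
          exact Or.inr (List.mem_map.mpr ⟨b', hb'mem, rfl⟩)
        have hb'm := List.mem_filter.mp hb'F
        have hpb'' : (pvHeaderA b'.1).isSome = true := by
          unfold pvAllParse at hall
          rw [List.all_eq_true] at hall
          have := hall b'.1 hb'm.1
          simpa [hb'm.2] using this
        obtain ⟨k', hk'⟩ := Option.isSome_iff_exists.mp hpb''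
        have hk'eq : k' = k1 := by
          have h1 := pvKeyD_of_header b'.1 k' hk'
          have h2 := pvKeyD_of_header b.1 k1 hk1
          rw [hkeyeq, h2] at h1
          simp only [Prod.mk.injEq, Option.some.injEq] at h1
          exact (Prod.ext h1.1 h1.2).symm
        have hpb' : pvHeaderA b'.1 = some k1 := by rw [hk', hk'eq]
        have hkmem : k1 ∈ (bs.map pvParseBlock).map Prod.fst :=
          List.mem_map.mpr ⟨pvParseBlock b', List.mem_map.mpr ⟨b', hb'mem, rfl⟩,
            by simp [pvParseBlock, hpb']⟩
        simp only [List.map_cons, List.foldl_cons, hk1, Option.getD_some,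
          show pvParseBlock b = (k1, b.2) from by simp [pvParseBlock, hk1]]
        exact congrArg some (pvFold_first_irrelevant _ _ _ _ _ hkmem)

-- ===== VERDICT (by name: the statement is the Claim_ definition above) =====
theorem parse_extr_exon_fasta_spec : Claim_unchanged_parse_extr_exon_fasta := by
  intro raw _hDom hPre hnD
  unfold parse_extr_exon_fasta parse_extr_exon_fasta_alt
  have hallL := pvPre_allParse hPre
  have hallF : pvAllParse ((PySem.Chars.splitOn raw.toList ['\n']).filter (fun l => !l.isEmpty)) = true :=
    pvAllParse_of_sublist List.filter_sublist hallL
  have hDfalse : ((match raw.toList.dropWhile (fun c => c == '\n') with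
      | [] => false
      | d :: _ => d != '>') &&
     (match pvHdrsD raw.toList with
      | [] => false
      | h :: hs => hs.all (fun h' => pvKeyD h' != pvKeyD h))) = false := by
    unfold D_parse_extr_exon_fasta at hnD
    simpa using hnD
  have hrec : ∀ l rest,
      (PySem.Chars.splitOn raw.toList ['\n']).filter (fun l => !l.isEmpty) = l :: rest →
      (l.head? == some '>') = false →
      ∀ h hs, rest.filter (fun x => x.head? == some '>') = h :: hs →
      ∃ h' ∈ hs, pvKeyD h' = pvKeyD h := by
    intro l rest hF hl h hs hhs
    rw [splitOn_single] at hF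
    have hfirst := pvFirst raw.toList
    rw [hF] at hfirst
    cases hdw : raw.toList.dropWhile (fun c => c == '\n') with
    | nil => rw [hdw] at hfirst; simp at hfirst
    | cons d u =>
      rw [hdw] at hfirst
      simp only [List.head?_cons, Option.some.injEq] at hfirst
      have hld : l.head? = some d := by rw [hfirst]; rfl
      have hd : (d != '>') = true := by
        rw [hld] at hl
        simpa using hl
      have hhd := pvRest_hdr raw.toList l rest hF hl
      rw [hhs] at hhd
      rw [hdw, ← hhd] at hDfalse
      dsimp only at hDfalse
      rw [hd, Bool.true_and] at hDfalse
      obtain ⟨h', hm, hne⟩ := List.all_eq_false.mp hDfalse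
      exact ⟨h', hm, by simpa using hne⟩
  have hD := pv_dicts _ hallF hrec
  rw [pvLoopA_filter]
  obtain ⟨stA, hstA, hfinA⟩ := Option.map_eq_some_iff.mp hD
  rw [hstA]
  obtain ⟨dA, hBA, cA, tA, eA⟩ := stA
  rw [pvSkipB_eq, pvLoopB_eq_fuel _ _ _ (le_refl _),
      pvLoopBF_blocks _ _ _ (le_refl _)
        (pvAllParse_of_sublist (pvTakeSeq_suffix _).sublist hallF) (pvTakeSeq_head _),
      pvTakeSeq_collect2]
  simp only [pvFin, pvIns] at hfinA
  cases hBA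
  · simp only [Bool.false_eq_true, if_false] at hfinA ⊢
    rw [hfinA]
  · simp only [if_true] at hfinA ⊢
    rw [hfinA]

theorem parse_extr_exon_fasta_changed : Claim_changed_parse_extr_exon_fasta := by
  unfold Claim_changed_parse_extr_exon_fasta
  refine ⟨by decide, by decide, by decide, by decide, ?_, by decide⟩
  show parse_extr_exon_fasta_alt pvDiffWitness_parse_extr_exon_fasta =
    pvDiffWitnessOut_parse_extr_exon_fasta.2
  unfold parse_extr_exon_fasta_alt
  rw [pvLoopB_eq_fuel _ _ _ (le_refl _)]
  decide

theorem parse_extr_exon_fasta_tight : Claim_exact_parse_extr_exon_fasta := by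
  intro raw _hDom hPre hD hEq
  unfold parse_extr_exon_fasta parse_extr_exon_fasta_alt at hEq
  have hallL := pvPre_allParse hPre
  have hallF : pvAllParse ((PySem.Chars.splitOn raw.toList ['\n']).filter (fun l => !l.isEmpty)) = true :=
    pvAllParse_of_sublist List.filter_sublist hallL
  have hDtrue : ((match raw.toList.dropWhile (fun c => c == '\n') with
      | [] => false
      | d :: _ => d != '>') &&
     (match pvHdrsD raw.toList with
      | [] => false
      | h :: hs => hs.all (fun h' => pvKeyD h' != pvKeyD h))) = true := hD
  rw [Bool.and_eq_true] at hDtrue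
  obtain ⟨hA1, hB1⟩ := hDtrue
  -- reduce both ports in hEq to the two dictionaries
  rw [pvLoopA_filter] at hEq
  have hA := pvLoopA_false ((PySem.Chars.splitOn raw.toList ['\n']).filter (fun l => !l.isEmpty))
    PySem.Dict.empty [] [] 0 hallF
  obtain ⟨stA, hstA, hfinA⟩ := Option.map_eq_some_iff.mp hA
  rw [hstA] at hEq
  obtain ⟨dA, hBA, cA, tA, eA⟩ := stA
  rw [pvSkipB_eq, pvLoopB_eq_fuel _ _ _ (le_refl _),
      pvLoopBF_blocks _ _ _ (le_refl _)
        (pvAllParse_of_sublist (pvTakeSeq_suffix _).sublist hallF) (pvTakeSeq_head _),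
      pvTakeSeq_collect2] at hEq
  simp only [pvFin, pvIns] at hfinA
  have hmapinj := List.map_injective_iff.mpr pvOut_inj
  have hDicts0 : (if hBA = true then
        PySem.Dict.insert dA tA ((dA.getD tA PySem.Dict.empty).insert eA cA) else dA) =
      ((pvCollect ((PySem.Chars.splitOn raw.toList ['\n']).filter (fun l => !l.isEmpty))).2.map
        pvParseBlock).foldl pvIns PySem.Dict.empty := by
    cases hBA
    · simp only [Bool.false_eq_true, if_false] at hEq ⊢
      exact PySem.Dict.ext (hmapinj hEq)
    · simp only [if_true] at hEq ⊢
      exact PySem.Dict.ext (hmapinj hEq)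
  have hDicts := hfinA.symm.trans hDicts0
  -- structure of the region: leading junk, a first header, no later duplicate of its key
  have hfirst := pvFirst raw.toList
  cases hdw : raw.toList.dropWhile (fun c => c == '\n') with
  | nil => rw [hdw] at hA1; simp at hA1
  | cons d u =>
    rw [hdw] at hA1 hfirst
    cases hF : (PySem.Chars.splitOn raw.toList ['\n']).filter (fun l => !l.isEmpty) with
    | nil =>
      rw [splitOn_single] at hF
      rw [hF] at hfirst
      simp at hfirst
    | cons l rest =>
      rw [splitOn_single] at hF
      rw [hF] at hfirst
      simp only [List.head?_cons, Option.some.injEq] at hfirst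
      have hld : l.head? = some d := by rw [hfirst]; rfl
      have hl : (l.head? == some '>') = false := by
        rw [hld]
        simpa using hA1
      have hh : ¬(l.head? == some '>') = true := by simp [hl]
      cases hph : pvHdrsD raw.toList with
      | nil => rw [hph] at hB1; simp at hB1
      | cons h hs =>
        rw [hph] at hB1
        have hhs : rest.filter (fun x => x.head? == some '>') = h :: hs := by
          rw [pvRest_hdr raw.toList l rest hF hl, hph]
        rw [← splitOn_single] at hF
        rw [hF] at hDicts hallF
        have hmap := pvCollect_headers (l :: rest)
        rw [List.filter_cons, if_neg hh, hhs] at hmap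
        cases hblocks : (pvCollect (l :: rest)).2 with
        | nil => rw [hblocks] at hmap; simp at hmap
        | cons b bs =>
          rw [hblocks] at hmap
          simp only [List.map_cons, List.cons.injEq] at hmap
          obtain ⟨hb1, hbs⟩ := hmap
          -- the first line is a nonempty non-header, so the lead is nonempty
          have hlne : l ≠ [] := by
            intro hcon
            rw [hcon] at hld
            simp at hld
          have hlead : (pvCollect (l :: rest)).1 = l ++ (pvCollect rest).1 := by
            simp [pvCollect, hh]
          -- the first header parses to k1
          have hbm : b.1 ∈ (l :: rest) ∧ (b.1.head? == some '>') = true := by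
            have : b.1 ∈ (l :: rest).filter (fun x => x.head? == some '>') := by
              rw [List.filter_cons, if_neg hh, hhs, hb1]
              simp
            exact List.mem_filter.mp this
          have hpb : (pvHeaderA b.1).isSome = true := by
            unfold pvAllParse at hallF
            rw [List.all_eq_true] at hallF
            have := hallF b.1 hbm.1
            simpa [hbm.2] using this
          obtain ⟨⟨t1, e1⟩, hk1⟩ := Option.isSome_iff_exists.mp hpb
          -- later blocks never write the slot (t1, e1)
          have hfresh : ∀ p ∈ bs.map pvParseBlock, p.1 ≠ (t1, e1) := by
            intro p hp hcon
            obtain ⟨b', hb'mem, rfl⟩ := List.mem_map.mp hp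
            have hb'hs : b'.1 ∈ hs := by
              rw [← hbs]
              exact List.mem_map.mpr ⟨b', hb'mem, rfl⟩
            have hb'F : b'.1 ∈ rest.filter (fun x => x.head? == some '>') := by
              rw [hhs]
              simp [hb'hs]
            have hb'm := List.mem_filter.mp hb'F
            have hpb' : (pvHeaderA b'.1).isSome = true := by
              unfold pvAllParse at hallF
              rw [List.all_eq_true] at hallF
              have := hallF b'.1 (by simp [hb'm.1])
              simpa [hb'm.2] using this
            obtain ⟨k', hk'⟩ := Option.isSome_iff_exists.mp hpb'
            have hkval : k' = (t1, e1) := by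
              have hpv : pvParseBlock b' = ((pvHeaderA b'.1).getD ([], 0), b'.2) := rfl
              rw [hpv, hk'] at hcon
              simpa using hcon
            rw [List.all_eq_true] at hB1
            have hu := hB1 b'.1 hb'hs
            rw [pvKeyD_of_header b'.1 k' hk',
              pvKeyD_of_header h (t1, e1) (by rw [← hb1]; exact hk1), hkval] at hu
            simp at hu
          -- evaluate the changed slot in both dictionaries
          rw [hblocks] at hDicts
          simp only [List.map_cons, List.foldl_cons, hk1, Option.getD_some, List.nil_append,
            show pvParseBlock b = ((t1, e1), b.2) from by simp [pvParseBlock, hk1]] at hDicts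
          have hga := pvFold_get2 (bs.map pvParseBlock)
            (pvIns PySem.Dict.empty ((t1, e1), (pvCollect (l :: rest)).1 ++ b.2)) t1 e1 hfresh
          have hgb := pvFold_get2 (bs.map pvParseBlock)
            (pvIns PySem.Dict.empty ((t1, e1), b.2)) t1 e1 hfresh
          rw [hDicts] at hga
          rw [pvIns_get2_self] at hga hgb
          rw [hga] at hgb
          have hval : (pvCollect (l :: rest)).1 ++ b.2 = b.2 := by simpa using hgb
          rw [hlead] at hval
          have hlen := congrArg List.length hval
          simp at hlen
          exact hlne (List.length_eq_zero_iff.mp (by omega))
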